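-- pv_equiv track=rewrite | github.com/mengstudy/lottery | analyzer/stats_calculator.py | calculate_missing_groups
-- ===== SOURCE A (Python) =====
-- from typing import Dict, List, Tuple
--
-- def calculate_missing_groups(red_balls: List[int], red_missing_values: List[int]) -> Dict[int, List[int]]:
--     """
--     计算遗漏次数分组（针对本期开出的红球）
--
--     Args:
--         red_balls: 本期开出的红球号码列表
--         red_missing_values: 本期开出的红球对应的遗漏值
--
--     Returns:
--         遗漏次数分组字典 {遗漏次数：[红球号码]}
--         例如：{0: [5, 12], 1: [3], 2: [8], 9+: [15, 20, 28]}
--     """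
--     groups = {}
--
--     for ball, missing in zip(red_balls, red_missing_values):
--         # 将遗漏次数 >= 9 的归为一组
--         group_key = missing if missing < 9 else 9
--
--         if group_key not in groups:
--             groups[group_key] = []
--         groups[group_key].append(ball)
--
--     # 按遗漏次数排序
--     sorted_groups = dict(sorted(groups.items()))
--
--     return sorted_groups
-- ===== SOURCE B (Python) =====
-- def calculate_missing_groups(red_balls, red_missing_values):
--     # pair each ball with its group key and sort (stably) by that key
--     decorated = sorted(((min(m, 9), b) for b, m in zip(red_balls, red_missing_values)),
--                        key=lambda p: p[0])
--     # one sweep over the key-sorted pairs, merging runs of equal keys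
--     groups = []
--     for k, b in decorated:
--         if groups and groups[-1][0] == k:
--             groups[-1][1].append(b)
--         else:
--             groups.append((k, [b]))
--     return dict(groups)
-- ===== Notes on version B (the rewrite author's own statement) =====
-- stated objective: alternative
-- what changed: Replaces A's dict bucketing followed by sorting the items with a stable sort of (group key, ball) pairs followed by one sweep that merges runs of equal keys.
import Mathlib
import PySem

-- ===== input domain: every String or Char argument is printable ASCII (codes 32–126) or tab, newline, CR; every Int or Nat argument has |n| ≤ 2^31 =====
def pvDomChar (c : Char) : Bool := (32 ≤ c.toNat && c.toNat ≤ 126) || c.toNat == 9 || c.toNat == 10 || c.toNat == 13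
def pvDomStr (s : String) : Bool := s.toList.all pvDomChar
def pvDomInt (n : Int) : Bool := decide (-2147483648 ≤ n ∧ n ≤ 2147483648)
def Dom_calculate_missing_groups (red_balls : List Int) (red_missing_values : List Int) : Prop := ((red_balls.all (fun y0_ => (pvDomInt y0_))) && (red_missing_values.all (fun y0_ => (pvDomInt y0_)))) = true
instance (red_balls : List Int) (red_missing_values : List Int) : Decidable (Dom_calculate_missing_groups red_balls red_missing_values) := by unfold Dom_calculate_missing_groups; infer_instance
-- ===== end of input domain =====

-- B replaces A's dict bucketing (then sorting the items) by a stable sort of the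
-- (group key, ball) pairs followed by one sweep merging runs of equal keys.

-- ===== PORT A =====
-- group_key = missing if missing < 9 else 9
def gkeyA (missing : Int) : Int := if missing < 9 then missing else 9

def calculate_missing_groups (red_balls : List Int) (red_missing_values : List Int) : List (Int × List Int) :=
  -- groups = {}; for ball, missing in zip(...): ...
  let groups : PySem.Dict Int (List Int) :=
    (red_balls.zip red_missing_values).foldl
      (fun groups bm =>
        let group_key := gkeyA bm.2
        -- if group_key not in groups: groups[group_key] = []
        let groups := if groups.contains group_key = false then groups.insert group_key [] else groups
        -- groups[group_key].append(ball)
        groups.modify group_key [] (fun l => l ++ [bm.1]))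
      PySem.Dict.empty
  -- sorted(groups.items()): dict keys are distinct, so Python's lexicographic tuple
  -- comparison never reaches the second component and equals comparison on the key.
  PySem.List.sorted groups.items (fun p => p.1)

-- ===== PORT B =====
-- B-side helper: the body of B's sweep loop over the key-sorted pairs
def sweepStep (groups : List (Int × List Int)) (kb : Int × Int) : List (Int × List Int) :=
  -- if groups and groups[-1][0] == k: groups[-1][1].append(b) else: groups.append((k, [b]))
  match groups.getLast? with
  | some kg => if kg.1 = kb.1 then groups.dropLast ++ [(kg.1, kg.2 ++ [kb.2])]
               else groups ++ [(kb.1, [kb.2])]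
  | none => [(kb.1, [kb.2])]

def calculate_missing_groups_alt (red_balls : List Int) (red_missing_values : List Int) : List (Int × List Int) :=
  -- decorated = sorted(((min(m, 9), b) for b, m in zip(...)), key=lambda p: p[0])
  let decorated := PySem.List.sorted
    ((red_balls.zip red_missing_values).map (fun p => (min p.2 9, p.1))) (fun p => p.1)
  -- the sweep builds (key, balls) pairs with strictly increasing (hence distinct) keys,
  -- so dict(groups) IS this association list
  decorated.foldl sweepStep []

-- ===== PRECONDITION & SPEC =====
def Spec_calculate_missing_groups (red_balls : List Int) (red_missing_values : List Int) (out : List (Int × List Int)) : Prop := out = calculate_missing_groups_alt red_balls red_missing_values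
instance (red_balls : List Int) (red_missing_values : List Int) (out : List (Int × List Int)) : Decidable (Spec_calculate_missing_groups red_balls red_missing_values out) := by unfold Spec_calculate_missing_groups; infer_instance

-- ===== CLAIM (what is proved, stated in full; the proofs are below) =====
def Claim_equal_calculate_missing_groups : Prop := ∀ (red_balls : List Int) (red_missing_values : List Int), Dom_calculate_missing_groups red_balls red_missing_values → Spec_calculate_missing_groups red_balls red_missing_values (calculate_missing_groups red_balls red_missing_values)

-- ===== LEMMAS AND PROOFS =====

-- A's "ensure key exists with [], then append" step is d[k] = d.get(k, []) + [x], i.e. a plain modify.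
lemma step_eq {κ ν : Type} [BEq κ] [LawfulBEq κ] (d : PySem.Dict κ (List ν)) (k : κ) (f : List ν → List ν) :
    (if d.contains k = false then d.insert k [] else d).modify k [] f = d.modify k [] f := by
  cases h : d.contains k <;>
    simp [h, PySem.Dict.modify, PySem.Dict.insert_insert_self, PySem.Dict.getD_insert_self,
      PySem.Dict.getD_of_not_contains]

lemma min_eq_gkeyA (m : Int) : min m 9 = gkeyA m := by
  unfold gkeyA; omega

-- A's fold equals the clean "modify per pair" fold over (key, ball) pairs
lemma foldA_eq (pairs : List (Int × Int)) (d : PySem.Dict Int (List Int)) :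
    pairs.foldl
      (fun groups bm =>
        let group_key := gkeyA bm.2
        let groups := if groups.contains group_key = false then groups.insert group_key [] else groups
        groups.modify group_key [] (fun l => l ++ [bm.1])) d
    = (pairs.map (fun bm => (gkeyA bm.2, bm.1))).foldl
        (fun d p => d.modify p.1 [] (fun l => l ++ [p.2])) d := by
  induction pairs generalizing d with
  | nil => rfl
  | cons bm t ih =>
    simp only [List.foldl_cons, List.map_cons]
    rw [step_eq]
    exact ih _

-- ordered insert of a key into a strictly increasing key list (no duplicate created)
def oi (a : Int) : List Int → List Int
  | [] => [a]
  | k :: t => if a < k then a :: k :: t else if a = k then k :: t else k :: oi a t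

lemma mem_oi (a x : Int) : ∀ ks : List Int, x ∈ oi a ks → x = a ∨ x ∈ ks := by
  intro ks
  induction ks with
  | nil => simp [oi]
  | cons k t ih =>
    simp only [oi]
    split_ifs with h1 h2 <;> intro hx
    · simpa using hx
    · right; exact hx
    · rcases List.mem_cons.mp hx with h | h
      · right; simp [h]
      · rcases ih h with h | h
        · left; exact h
        · right; simp [h]

lemma oi_of_mem (a : Int) : ∀ ks : List Int, ks.Pairwise (· < ·) → a ∈ ks → oi a ks = ks := by
  intro ks
  induction ks with
  | nil => simp
  | cons k t ih =>
    intro hp hm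
    rcases List.mem_cons.mp hm with h | h
    · subst h; simp [oi]
    · have hk : k < a := (List.pairwise_cons.mp hp).1 a h
      have : ¬ a < k := by omega
      have : a ≠ k := by omega
      simp only [oi, if_neg ‹¬ a < k›, if_neg ‹a ≠ k›]
      rw [ih (List.pairwise_cons.mp hp).2 h]

lemma oi_perm (a : Int) : ∀ ks : List Int, a ∉ ks → (oi a ks).Perm (a :: ks) := by
  intro ks
  induction ks with
  | nil => simp [oi]
  | cons k t ih =>
    intro hm
    have hak : a ≠ k := fun h => hm (by simp [h])
    by_cases h1 : a < k
    · simp [oi, h1]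
    · simp only [oi, if_neg h1, if_neg hak]
      exact (List.Perm.cons k (ih (fun h => hm (List.mem_cons_of_mem _ h)))).trans
        (List.Perm.swap a k t)

lemma oi_pairwise (a : Int) : ∀ ks : List Int, ks.Pairwise (· < ·) → (oi a ks).Pairwise (· < ·) := by
  intro ks
  induction ks with
  | nil => simp [oi]
  | cons k t ih =>
    intro hp
    obtain ⟨hkt, hpt⟩ := List.pairwise_cons.mp hp
    by_cases h1 : a < k
    · simp only [oi, if_pos h1]
      refine List.pairwise_cons.mpr ⟨?_, hp⟩
      intro y hy
      rcases List.mem_cons.mp hy with h | h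
      · omega
      · have := hkt y h; omega
    · by_cases h2 : a = k
      · simp [oi, h1, h2, hp]
      · simp only [oi, if_neg h1, if_neg h2]
        refine List.pairwise_cons.mpr ⟨?_, ih hpt⟩
        intro y hy
        rcases mem_oi a y t hy with h | h
        · omega
        · exact hkt y h

lemma insertBy_front {α : Type} (before : α → α → Bool) (x : α) (ys : List α)
    (h : ∀ y ∈ ys, before x y = true) :
    PySem.List.insertBy before x ys = x :: ys := by
  cases ys with
  | nil => rfl
  | cons y t => simp [PySem.List.insertBy, h y (by simp)]

lemma insertBy_append_not_before {α : Type} (before : α → α → Bool) (x : α) (zs ys : List α)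
    (h : ∀ z ∈ zs, before x z = false) :
    PySem.List.insertBy before x (zs ++ ys) = zs ++ PySem.List.insertBy before x ys := by
  induction zs with
  | nil => simp
  | cons z t ih =>
    have hz := h z (by simp)
    simp only [List.cons_append, PySem.List.insertBy, hz]
    simp only [Bool.false_eq_true, if_false, List.cons.injEq, true_and]
    exact ih (fun w hw => h w (by simp [hw]))

lemma flatMap_if_not_mem (x : Int × Int) (f : Int → List (Int × Int)) :
    ∀ ks : List Int, x.1 ∉ ks →
      ks.flatMap (fun k => f k ++ if x.1 = k then [x] else []) = ks.flatMap f := by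
  intro ks
  induction ks with
  | nil => simp
  | cons k t ih =>
    intro hm
    have : x.1 ≠ k := fun h => hm (by simp [h])
    simp only [List.flatMap_cons, if_neg this, List.append_nil,
      ih (fun h => hm (List.mem_cons_of_mem _ h))]

-- inserting one decorated pair into a key-grouped concatenation appends it to its key's run
lemma insertBy_flatMap (x : Int × Int) :
    ∀ (ks : List Int) (f : Int → List (Int × Int)),
      ks.Pairwise (· < ·) →
      (∀ k ∈ ks, ∀ p ∈ f k, p.1 = k) →
      (∀ k ∈ ks, f k ≠ []) →
      (x.1 ∉ ks → f x.1 = []) →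
      PySem.List.insertBy (fun a b => decide (a.1 < b.1)) x (ks.flatMap f)
        = (oi x.1 ks).flatMap (fun k => f k ++ if x.1 = k then [x] else []) := by
  intro ks
  induction ks with
  | nil =>
    intro f _ _ _ hx
    simp [oi, PySem.List.insertBy, hx (by simp)]
  | cons k t ih =>
    intro f hp hf hne hx
    obtain ⟨hkt, hpt⟩ := List.pairwise_cons.mp hp
    rcases lt_trichotomy x.1 k with h1 | h1 | h1
    · -- x's key goes in front of everything
      have hxm : x.1 ∉ k :: t := by
        intro hm
        rcases List.mem_cons.mp hm with h | h
        · omega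
        · have := hkt _ h; omega
      have hfront : PySem.List.insertBy (fun a b => decide (a.1 < b.1)) x ((k :: t).flatMap f)
          = x :: (k :: t).flatMap f := by
        apply insertBy_front
        intro y hy
        obtain ⟨k', hk', hy'⟩ := List.mem_flatMap.mp hy
        have : y.1 = k' := hf k' hk' y hy'
        have : x.1 < y.1 := by
          rcases List.mem_cons.mp hk' with h | h
          · omega
          · have := hkt _ h; omega
        simpa using this
      rw [hfront]
      have hxk : x.1 ≠ k := by omega
      have hxt : x.1 ∉ t := fun h => hxm (List.mem_cons_of_mem _ h)
      simp [oi, h1, hx hxm, flatMap_if_not_mem x f t hxt, hxk]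
    · -- x's key equals the first group's key: x lands at the end of that run
      have hxt : x.1 ∉ t := by
        intro h; have := hkt _ h; omega
      rw [List.flatMap_cons, insertBy_append_not_before _ _ _ _
        (fun z hz => by simp [hf k (by simp) z hz, h1])]
      rw [insertBy_front _ _ _ (fun y hy => by
        obtain ⟨k', hk', hy'⟩ := List.mem_flatMap.mp hy
        have : y.1 = k' := hf k' (List.mem_cons_of_mem _ hk') y hy'
        have := hkt _ hk'
        simp only [decide_eq_true_eq]; omega)]
      have hnlt : ¬ x.1 < k := by omega
      simp [oi, hnlt, h1]
      rw [← h1]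
      exact (flatMap_if_not_mem x f t hxt).symm
    · -- x's key is larger: skip the first run and recurse
      have hk1 : ¬ x.1 < k := by omega
      have hk2 : x.1 ≠ k := by omega
      rw [List.flatMap_cons, insertBy_append_not_before _ _ _ _
        (fun z hz => by simp [hf k (by simp) z hz]; omega)]
      rw [ih f hpt (fun k' h => hf k' (List.mem_cons_of_mem _ h))
        (fun k' h => hne k' (List.mem_cons_of_mem _ h))
        (fun h => hx (fun hm => h (by rcases List.mem_cons.mp hm with h' | h' <;> [omega; exact h'])))]
      simp [oi, hk1, hk2]

-- sorted(ofList(m ++ [a])) = ordered insert of a into sorted(ofList m)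
lemma sorted_ofList_append (m : List Int) (a : Int) :
    PySem.List.sorted (PySem.Set.ofList (m ++ [a])) (fun x => x)
      = oi a (PySem.List.sorted (PySem.Set.ofList m) (fun x => x)) := by
  have hadd : PySem.Set.ofList (m ++ [a]) = PySem.Set.add (PySem.Set.ofList m) a := by
    simp [PySem.Set.ofList, List.foldl_append]
  by_cases hm : a ∈ PySem.Set.ofList m
  · rw [hadd, show PySem.Set.add (PySem.Set.ofList m) a = PySem.Set.ofList m by
      simp [PySem.Set.add, (PySem.Set.mem_ofList m a).mp hm]]
    rw [oi_of_mem a _ (PySem.List.sorted_ofList_pairwise_lt m)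
      (by rw [PySem.List.mem_sorted]; exact hm)]
  · have hm' : a ∉ m := fun h => hm ((PySem.Set.mem_ofList m a).mpr h)
    rw [hadd, show PySem.Set.add (PySem.Set.ofList m) a = PySem.Set.ofList m ++ [a] by
      simp [PySem.Set.add, hm']]
    have hnotks : a ∉ PySem.List.sorted (PySem.Set.ofList m) (fun x => x) := by
      rw [PySem.List.mem_sorted]; exact hm
    refine PySem.List.sorted_eq_of_perm_of_pairwise_lt _ _ _ ?_ ?_
    · exact ((oi_perm a _ hnotks).trans
        (List.Perm.cons a (PySem.List.sorted_perm _ _ _))).trans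
        (List.perm_append_singleton _ _).symm
    · exact oi_pairwise a _ (PySem.List.sorted_ofList_pairwise_lt m)

-- STABILITY: the key-sort of a decorated list is the concatenation, over the sorted
-- distinct keys, of the runs of each key in original order
lemma sorted_eq_flatMap (l : List (Int × Int)) :
    PySem.List.sorted l (fun p => p.1)
      = (PySem.List.sorted (PySem.Set.ofList (l.map (fun p => p.1))) (fun x => x)).flatMap
          (fun k => l.filter (fun p => p.1 == k)) := by
  induction l using List.reverseRecOn with
  | nil => simp [PySem.List.sorted_eq_foldl_insertBy, PySem.Set.ofList]
  | append_singleton l x ih =>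
    rw [PySem.List.sorted_eq_foldl_insertBy, List.foldl_append, List.foldl_cons, List.foldl_nil,
      ← PySem.List.sorted_eq_foldl_insertBy, ih]
    rw [insertBy_flatMap x _ _ (PySem.List.sorted_ofList_pairwise_lt _)
      (fun k _ p hp => by simpa using (List.mem_filter.mp hp).2)
      (fun k hk => by
        rw [PySem.List.mem_sorted, PySem.Set.mem_ofList, List.mem_map] at hk
        obtain ⟨p, hp, hpk⟩ := hk
        exact List.ne_nil_of_mem (List.mem_filter.mpr ⟨hp, by simp [hpk]⟩))
      (fun hx => by
        rw [List.filter_eq_nil_iff]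
        intro p hp hpx
        exact hx (by
          rw [PySem.List.mem_sorted, PySem.Set.mem_ofList, List.mem_map]
          exact ⟨p, hp, by simpa using hpx⟩))]
    rw [List.map_append, show (List.map (fun p => p.1) [x]) = [x.1] from rfl,
      sorted_ofList_append]
    congr 1
    funext k
    by_cases hxk : x.1 = k <;>
      simp [List.filter_append, beq_iff_eq, hxk]

-- the sweep absorbs a whole run of pairs with the key of the last open group
lemma sweep_run (k : Int) : ∀ (ps : List (Int × Int)) (acc : List (Int × List Int)) (g : List Int),
    (∀ p ∈ ps, p.1 = k) →
    List.foldl sweepStep (acc ++ [(k, g)]) ps = acc ++ [(k, g ++ ps.map (fun p => p.2))] := by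
  intro ps
  induction ps with
  | nil => intro acc g _; simp
  | cons p t ih =>
    intro acc g h
    have hpk : p.1 = k := h p (by simp)
    simp only [List.foldl_cons]
    rw [show sweepStep (acc ++ [(k, g)]) p = acc ++ [(k, g ++ [p.2])] from by
      simp [sweepStep, hpk]]
    rw [ih acc (g ++ [p.2]) (fun q hq => h q (by simp [hq]))]
    simp

-- the sweep over a key-grouped concatenation produces one (key, balls) pair per group
lemma sweep_flatMap : ∀ (ks : List Int) (acc : List (Int × List Int)) (f : Int → List (Int × Int)),
    ks.Pairwise (· < ·) →
    (∀ k ∈ ks, ∀ p ∈ f k, p.1 = k) →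
    (∀ k ∈ ks, f k ≠ []) →
    (∀ kg, acc.getLast? = some kg → ∀ k ∈ ks, kg.1 ≠ k) →
    List.foldl sweepStep acc (ks.flatMap f)
      = acc ++ ks.map (fun k => (k, (f k).map (fun p => p.2))) := by
  intro ks
  induction ks with
  | nil => intro acc f _ _ _ _; simp
  | cons k t ih =>
    intro acc f hp hf hne hacc
    obtain ⟨q, qt, hq⟩ := List.exists_cons_of_ne_nil (hne k (by simp))
    have hq1 : q.1 = k := hf k (by simp) q (by simp [hq])
    have hstep : sweepStep acc q = acc ++ [(k, [q.2])] := by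
      cases hL : acc.getLast? with
      | none =>
        have : acc = [] := List.getLast?_eq_none_iff.mp hL
        simp [this, sweepStep, hq1]
      | some kg =>
        have hne' : kg.1 ≠ k := hacc kg hL k (by simp)
        simp [sweepStep, hL, hne', hq1]
    have h1 : List.foldl sweepStep acc (f k) = acc ++ [(k, (f k).map (fun p => p.2))] := by
      rw [hq]
      simp only [List.foldl_cons]
      rw [hstep, sweep_run k qt acc [q.2] (fun p hp' => hf k (by simp) p (by simp [hq, hp']))]
      simp
    rw [List.flatMap_cons, List.foldl_append, h1,
      ih (acc ++ [(k, (f k).map (fun p => p.2))]) f (List.pairwise_cons.mp hp).2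
        (fun k' h => hf k' (by simp [h])) (fun k' h => hne k' (by simp [h]))
        (fun kg hkg k' hk' => by
          rw [List.getLast?_concat] at hkg
          cases hkg
          have := (List.pairwise_cons.mp hp).1 k' hk'
          exact fun he => by simp at he; omega)]
    simp

theorem calculate_missing_groups_spec : Claim_equal_calculate_missing_groups := by
  intro red_balls red_missing_values _
  unfold Spec_calculate_missing_groups calculate_missing_groups calculate_missing_groups_alt
  simp only [min_eq_gkeyA, foldA_eq]
  set pairs := red_balls.zip red_missing_values with hpairs
  set qs := pairs.map (fun bm => (gkeyA bm.2, bm.1)) with hqs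
  set D := qs.foldl (fun d p => d.modify p.1 [] (fun l => l ++ [p.2])) PySem.Dict.empty with hD
  set ks := PySem.List.sorted (PySem.Set.ofList (qs.map (fun p => p.1))) (fun x => x) with hks
  have hksp : ks.Pairwise (· < ·) := by
    rw [hks]; exact PySem.List.sorted_ofList_pairwise_lt _
  have hnodup : D.keys.Nodup := by
    rw [hD]
    exact PySem.Dict.nodup_keys_foldl_modify_key qs Prod.fst [] (fun _ p => fun l => l ++ [p.2])
      PySem.Dict.empty (by simp [pysem])
  have hkeys : D.keys = PySem.Set.ofList (qs.map (fun p => p.1)) := by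
    rw [hD]
    rw [show (fun (d : PySem.Dict Int (List Int)) (p : Int × Int) => d.modify p.1 [] (fun l => l ++ [p.2]))
        = (fun d p => d.modify (Prod.fst p) [] ((fun _ q => fun l => l ++ [q.2]) d p)) from rfl]
    rw [PySem.Dict.keys_foldl_modify_key qs Prod.fst [] (fun _ q => fun l => l ++ [q.2]) PySem.Dict.empty]
    simp [pysem, PySem.Set.ofList, List.foldl_map]
  have hgetD : ∀ k : Int, D.getD k [] = (qs.filter (fun p => p.1 == k)).map (fun p => p.2) := by
    intro k
    rw [hD, PySem.Dict.getD_foldl_modify_append qs PySem.Dict.empty k]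
    simp [pysem]
  have hitems : D.items
      = (PySem.Set.ofList (qs.map (fun p => p.1))).map
          (fun k => (k, (qs.filter (fun p => p.1 == k)).map (fun p => p.2))) := by
    rw [PySem.Dict.items_eq_map_keys D hnodup [], hkeys]
    exact List.map_congr_left (fun k _ => by rw [hgetD k])
  have hf : ∀ k ∈ ks, ∀ p ∈ qs.filter (fun p => p.1 == k), p.1 = k :=
    fun k _ p hp => by simpa using (List.mem_filter.mp hp).2
  have hne : ∀ k ∈ ks, qs.filter (fun p => p.1 == k) ≠ [] := by
    intro k hk
    rw [hks, PySem.List.mem_sorted, PySem.Set.mem_ofList, List.mem_map] at hk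
    obtain ⟨p, hp, hpk⟩ := hk
    exact List.ne_nil_of_mem (List.mem_filter.mpr ⟨hp, by simp [hpk]⟩)
  have hA : PySem.List.sorted D.items (fun p => p.1)
      = ks.map (fun k => (k, (qs.filter (fun p => p.1 == k)).map (fun p => p.2))) := by
    refine PySem.List.sorted_eq_of_perm_of_pairwise_lt _ _ _ ?_ ?_
    · rw [hitems, hks]
      exact List.Perm.map _ (PySem.List.sorted_perm _ _ _)
    · rw [List.pairwise_map]
      simpa using hksp
  have hB : (PySem.List.sorted qs (fun p => p.1)).foldl sweepStep []
      = ks.map (fun k => (k, (qs.filter (fun p => p.1 == k)).map (fun p => p.2))) := by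
    rw [sorted_eq_flatMap qs, ← hks]
    rw [sweep_flatMap ks [] _ hksp hf hne (fun kg hkg => by simp at hkg)]
    simp
  rw [hA.trans hB.symm]
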